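-- pv_equiv track=rewrite | github.com/Neeraja0613/codemind-python | grid.py | min_treasure_sum
-- ===== SOURCE A (Python) =====
-- def min_treasure_sum(grid):
--     n = len(grid)
--     dp = grid[0][:]  # Copy of first row
--
--     for i in range(1, n):
--         new_dp = [0] * n
--
--         # Find the smallest and second smallest in previous row
--         min1 = min2 = float('inf')
--         idx1 = idx2 = -1
--         for j in range(n):
--             if dp[j] < min1:
--                 min2, idx2 = min1, idx1
--                 min1, idx1 = dp[j], j
--             elif dp[j] < min2:
--                 min2, idx2 = dp[j], j
--
--         for j in range(n):
--             # Use second min if same column as previous min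
--             new_dp[j] = grid[i][j] + (min2 if j == idx1 else min1)
--
--         dp = new_dp
--
--     return min(dp)
-- ===== SOURCE B (Python) =====
-- def min_treasure_sum(grid):
--     n = len(grid)
--     dp = grid[0][:]  # Copy of first row
--
--     for i in range(1, n):
--         # direct per-cell scan: best predecessor from any other column
--         dp = [grid[i][j] + min(dp[k] for k in range(n) if k != j)
--               for j in range(n)]
--
--     return min(dp)
-- ===== Notes on version B (the rewrite author's own statement) =====
-- stated objective: simpler
-- what changed: Replaces the min1/min2/idx1/idx2 smallest-and-second-smallest bookkeeping scan with a direct per-cell minimum over the previous row excluding the same column, written as one comprehension per row.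
-- outside the precondition, e.g. on min_treasure_sum([]): A raises IndexError, B raises IndexError
import Mathlib
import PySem

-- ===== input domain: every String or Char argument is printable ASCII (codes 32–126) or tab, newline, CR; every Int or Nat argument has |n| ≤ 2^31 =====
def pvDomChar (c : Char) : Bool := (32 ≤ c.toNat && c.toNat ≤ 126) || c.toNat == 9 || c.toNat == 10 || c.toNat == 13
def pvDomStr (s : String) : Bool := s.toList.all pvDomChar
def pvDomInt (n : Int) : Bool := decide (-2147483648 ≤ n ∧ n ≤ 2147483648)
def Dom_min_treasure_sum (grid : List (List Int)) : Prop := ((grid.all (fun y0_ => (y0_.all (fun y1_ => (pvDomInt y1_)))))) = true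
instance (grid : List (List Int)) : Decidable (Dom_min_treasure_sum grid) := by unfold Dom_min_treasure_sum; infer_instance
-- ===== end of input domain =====

-- B replaces A's smallest/second-smallest (min1/min2/idx1/idx2) bookkeeping scan by a direct
-- per-cell minimum over the previous row excluding the same column (simpler, not faster).

-- ===== PORT A =====
-- x < m where m models Python's float('inf') initial value of min1/min2 as none
def pvLtInf (x : Int) (m : Option Int) : Bool :=
  match m with
  | none => true
  | some v => x < v

-- the body of A's first inner loop (the min1/min2 scan); state = (min1, idx1, min2, idx2)
def pvScanStep (dp : List Int) (st : Option Int × Int × Option Int × Int) (j : Int) :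
    Option Int × Int × Option Int × Int :=
  let x := PySem.List.pyGetD dp j 0          -- dp[j]; in range under Pre_
  if pvLtInf x st.1 then (some x, j, st.1, st.2.1)
  else if pvLtInf x st.2.2.1 then (st.1, st.2.1, some x, j)
  else st

-- one iteration of A's row loop: the scan, then building new_dp
def pvRowA (grid : List (List Int)) (n : Nat) (dp : List Int) (i : Int) : List Int :=
  let st := (PySem.List.pyRange 0 (n : Int) 1).foldl (pvScanStep dp) (none, -1, none, -1)
  (PySem.List.pyRange 0 (n : Int) 1).map (fun j =>
    PySem.List.pyGetD (PySem.List.pyGetD grid i []) j 0 +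
      (if j == st.2.1 then st.2.2.1.getD 0 else st.1.getD 0))
      -- min1/min2 are always integers here (n ≥ 2 whenever the row loop runs); .getD 0 is unreachable padding

def min_treasure_sum (grid : List (List Int)) : Int :=
  let n := grid.length
  let dp0 := PySem.List.pyGetD grid 0 []     -- grid[0][:]; grid ≠ [] under Pre_
  let dp := (PySem.List.pyRange 1 (n : Int) 1).foldl (fun dp i => pvRowA grid n dp i) dp0
  (PySem.List.min? dp (fun x => x)).getD 0   -- min(dp); dp ≠ [] under Pre_

-- ===== PORT B =====
-- the values B's inner generator yields: dp[k] for k in range(n) if k != j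
def pvExcl (dp : List Int) (n : Int) (j : Int) : List Int :=
  (PySem.List.pyRange 0 n 1).filterMap
    (fun k => if k ≠ j then some (PySem.List.pyGetD dp k 0) else none)

-- one iteration of B's row loop: per-cell minimum over the previous row, skipping column j
def pvRowB (grid : List (List Int)) (n : Nat) (dp : List Int) (i : Int) : List Int :=
  (PySem.List.pyRange 0 (n : Int) 1).map (fun j =>
    PySem.List.pyGetD (PySem.List.pyGetD grid i []) j 0 +
      (PySem.List.min? (pvExcl dp (n : Int) j) (fun x => x)).getD 0)
        -- min(...): nonempty generator whenever the row loop runs (n ≥ 2)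

def min_treasure_sum_alt (grid : List (List Int)) : Int :=
  let n := grid.length
  let dp0 := PySem.List.pyGetD grid 0 []     -- grid[0][:]; grid ≠ [] under Pre_
  let dp := (PySem.List.pyRange 1 (n : Int) 1).foldl (fun dp i => pvRowB grid n dp i) dp0
  (PySem.List.min? dp (fun x => x)).getD 0   -- min(dp); dp ≠ [] under Pre_

-- ===== PRECONDITION & SPEC =====
-- exactly the inputs on which Python A returns: a nonempty grid whose every row has at least
-- len(grid) entries (otherwise grid[0] / dp[j] / grid[i][j] raises IndexError, or min([]) ValueError)
def Pre_min_treasure_sum (grid : List (List Int)) : Prop :=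
  grid ≠ [] ∧ ∀ row ∈ grid, grid.length ≤ row.length
instance (grid : List (List Int)) : Decidable (Pre_min_treasure_sum grid) := by
  unfold Pre_min_treasure_sum; infer_instance

def pvWitness_min_treasure_sum : List (List Int) := [[1, 2], [3, 4]]

def Spec_min_treasure_sum (grid : List (List Int)) (out : Int) : Prop := out = min_treasure_sum_alt grid
instance (grid : List (List Int)) (out : Int) : Decidable (Spec_min_treasure_sum grid out) := by unfold Spec_min_treasure_sum; infer_instance

-- ===== CLAIM (what is proved, stated in full; the proofs are below) =====
def Claim_equal_min_treasure_sum : Prop := ∀ (grid : List (List Int)), Dom_min_treasure_sum grid → Pre_min_treasure_sum grid → Spec_min_treasure_sum grid (min_treasure_sum grid)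

-- ===== LEMMAS AND PROOFS =====

lemma pvMem_excl {dp : List Int} {n j x : Int} :
    x ∈ pvExcl dp n j ↔ ∃ k : Int, 0 ≤ k ∧ k < n ∧ k ≠ j ∧ x = PySem.List.pyGetD dp k 0 := by
  simp only [pvExcl, List.mem_filterMap, PySem.List.mem_pyRange_one]
  constructor
  · rintro ⟨k, ⟨hk0, hkn⟩, hx⟩
    by_cases h : k = j
    · simp [h] at hx
    · exact ⟨k, hk0, hkn, h, by simpa [h] using hx.symm⟩
  · rintro ⟨k, hk0, hkn, hkj, rfl⟩
    exact ⟨k, ⟨hk0, hkn⟩, by simp [hkj]⟩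

lemma pvMin_id_eq_some {xs : List Int} {x : Int} (hx : x ∈ xs) (hb : ∀ y ∈ xs, x ≤ y) :
    PySem.List.min? xs (fun y => y) = some x := by
  cases h : PySem.List.min? xs (fun y => y) with
  | none =>
      rw [PySem.List.min?_eq_none_iff] at h
      subst h; cases hx
  | some m =>
      have hm := PySem.List.min?_mem h
      have hmin := PySem.List.min?_isMin h
      have h1 : m ≤ x := hmin x hx
      have h2 : x ≤ m := hb m hm
      rw [le_antisymm h2 h1]

-- the invariant of A's min1/min2 scan over the first m indices
lemma pvScan_spec (dp : List Int) (m : Nat) (hm : 1 ≤ m) :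
    ∃ (i1 : Int) (m2 : Option Int) (i2 : Int),
      (PySem.List.pyRange 0 (m : Int) 1).foldl (pvScanStep dp) (none, -1, none, -1)
        = (some (PySem.List.pyGetD dp i1 0), i1, m2, i2) ∧
      0 ≤ i1 ∧ i1 < (m : Int) ∧
      (∀ k : Int, 0 ≤ k → k < (m : Int) →
        PySem.List.pyGetD dp i1 0 ≤ PySem.List.pyGetD dp k 0) ∧
      m2 = PySem.List.min? (pvExcl dp (m : Int) i1) (fun y => y) := by
  induction m with
  | zero => omega
  | succ m ih =>
    have hsplit : PySem.List.pyRange 0 ((m + 1 : Nat) : Int) 1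
        = PySem.List.pyRange 0 (m : Int) 1 ++ [(m : Int)] := by
      push_cast
      exact PySem.List.pyRange_one_succ_right (by positivity)
    have hexcl : ∀ j : Int, pvExcl dp ((m + 1 : Nat) : Int) j
        = pvExcl dp (m : Int) j
          ++ (if (m : Int) ≠ j then [PySem.List.pyGetD dp (m : Int) 0] else []) := by
      intro j
      unfold pvExcl
      rw [hsplit, List.filterMap_append]
      congr 1
      by_cases h : (m : Int) = j <;> simp [h]
    by_cases hm1 : m = 0
    · -- first iteration of the scan: dp[0] becomes min1, min2 stays inf
      subst hm1
      refine ⟨0, none, -1, ?_, le_refl 0, by norm_num, ?_, ?_⟩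
      · rw [hsplit]
        simp [pvScanStep, pvLtInf, PySem.List.pyRange_one_eq_nil (le_refl (0 : Int))]
      · intro k hk0 hk1
        have : k = 0 := by omega
        subst this
        exact le_refl _
      · rw [eq_comm, PySem.List.min?_eq_none_iff, hexcl]
        simp [pvExcl, PySem.List.pyRange_one_eq_nil (le_refl (0 : Int))]
    · obtain ⟨i1, m2, i2, hst, hi0, hi1, hmin, hm2⟩ := ih (by omega)
      rw [hsplit, List.foldl_append, hst] at *
      simp only [List.foldl_cons, List.foldl_nil]
      by_cases hc1 : pvLtInf (PySem.List.pyGetD dp (m : Int) 0) (some (PySem.List.pyGetD dp i1 0)) = true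
      · -- dp[m] < min1: new minimum at index m, old min1 becomes min2
        have hlt : PySem.List.pyGetD dp (m : Int) 0 < PySem.List.pyGetD dp i1 0 := by
          simpa [pvLtInf] using hc1
        refine ⟨(m : Int), some (PySem.List.pyGetD dp i1 0), i1, ?_, by positivity, by push_cast; omega, ?_, ?_⟩
        · simp only [pvScanStep]
          rw [if_pos hc1]
        · intro k hk0 hkn
          by_cases hk : k < (m : Int)
          · exact le_trans (le_of_lt hlt) (hmin k hk0 hk)
          · have : k = (m : Int) := by omega
            subst this
            exact le_refl _
        · rw [hexcl]
          simp only [ne_eq, not_true_eq_false, if_false, List.append_nil]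
          symm
          apply pvMin_id_eq_some
          · exact pvMem_excl.mpr ⟨i1, hi0, hi1, by omega, rfl⟩
          · intro y hy
            obtain ⟨k, hk0, hkn, _, rfl⟩ := pvMem_excl.mp hy
            exact hmin k hk0 hkn
      · have hge : PySem.List.pyGetD dp i1 0 ≤ PySem.List.pyGetD dp (m : Int) 0 := by
          simpa [pvLtInf] using hc1
        have hne : (m : Int) ≠ i1 := by omega
        have hminall : ∀ k : Int, 0 ≤ k → k < ((m + 1 : Nat) : Int) →
            PySem.List.pyGetD dp i1 0 ≤ PySem.List.pyGetD dp k 0 := by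
          intro k hk0 hkn
          by_cases hk : k < (m : Int)
          · exact hmin k hk0 hk
          · have : k = (m : Int) := by push_cast at hkn; omega
            subst this
            exact hge
        by_cases hc2 : pvLtInf (PySem.List.pyGetD dp (m : Int) 0) m2 = true
        · -- min1 ≤ dp[m] < min2: dp[m] becomes the new min2
          refine ⟨i1, some (PySem.List.pyGetD dp (m : Int) 0), (m : Int), ?_, hi0, by push_cast; omega, hminall, ?_⟩
          · simp only [pvScanStep]
            rw [if_neg hc1, if_pos hc2]
          · rw [hexcl, if_pos hne]
            symm
            apply pvMin_id_eq_some
            · exact List.mem_append_right _ (List.mem_singleton.mpr rfl)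
            · intro y hy
              rcases List.mem_append.mp hy with hy | hy
              · cases hm2v : m2 with
                | none =>
                    rw [hm2v, eq_comm, PySem.List.min?_eq_none_iff] at hm2
                    rw [hm2] at hy
                    cases hy
                | some m2v =>
                    have hlt2 : PySem.List.pyGetD dp (m : Int) 0 < m2v := by
                      simpa [pvLtInf, hm2v] using hc2
                    have := PySem.List.min?_isMin (by rw [← hm2, hm2v]) y hy
                    omega
              · rw [List.mem_singleton.mp hy]
        · -- dp[m] changes nothing
          obtain ⟨m2v, hm2v⟩ : ∃ v, m2 = some v := by
            cases hm2v : m2 with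
            | none => rw [hm2v] at hc2; simp [pvLtInf] at hc2
            | some v => exact ⟨v, rfl⟩
          have hge2 : m2v ≤ PySem.List.pyGetD dp (m : Int) 0 := by
            rw [hm2v] at hc2
            simpa [pvLtInf] using hc2
          refine ⟨i1, m2, i2, ?_, hi0, by push_cast; omega, hminall, ?_⟩
          · simp only [pvScanStep]
            rw [if_neg hc1, if_neg hc2]
          · rw [hexcl, if_pos hne, hm2v]
            symm
            apply pvMin_id_eq_some
            · exact List.mem_append_left _ (PySem.List.min?_mem (by rw [← hm2, hm2v]))
            · intro y hy
              rcases List.mem_append.mp hy with hy | hy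
              · exact PySem.List.min?_isMin (by rw [← hm2, hm2v]) y hy
              · rw [List.mem_singleton.mp hy]
                exact hge2

-- per-cell agreement: A's (min2 if j == idx1 else min1) equals B's min over k ≠ j
lemma pvRow_eq (grid : List (List Int)) (n : Nat) (dp : List Int) (i : Int) :
    pvRowA grid n dp i = pvRowB grid n dp i := by
  cases n with
  | zero =>
      simp only [pvRowA, pvRowB, Nat.cast_zero]
      rw [PySem.List.pyRange_one_eq_nil (by norm_num)]
      rfl
  | succ m =>
      obtain ⟨i1, m2, i2, hst, hi0, hi1, hmin, hm2⟩ := pvScan_spec dp (m + 1) (by omega)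
      simp only [pvRowA, pvRowB, hst]
      apply List.map_congr_left
      intro j hj
      rw [PySem.List.mem_pyRange_one] at hj
      congr 1
      by_cases hji : j = i1
      · subst hji
        simp only [beq_self_eq_true, if_pos, hm2]
      · have hb : (j == i1) = false := beq_eq_false_iff_ne.mpr hji
        rw [hb, if_neg (by simp)]
        have : PySem.List.min? (pvExcl dp ((m + 1 : Nat) : Int) j) (fun y => y)
            = some (PySem.List.pyGetD dp i1 0) := by
          apply pvMin_id_eq_some
          · exact pvMem_excl.mpr ⟨i1, hi0, hi1, fun h => hji h.symm, rfl⟩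
          · intro y hy
            obtain ⟨k, hk0, hkn, _, rfl⟩ := pvMem_excl.mp hy
            exact hmin k hk0 hkn
        rw [this]

theorem min_treasure_sum_spec : Claim_equal_min_treasure_sum := by
  intro grid _ _
  unfold Spec_min_treasure_sum min_treasure_sum min_treasure_sum_alt
  simp only [pvRow_eq]
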